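-- pv_equiv track=rewrite | github.com/yonsweng/ps | codeforces/1624/d.py | solve
-- ===== SOURCE A (Python) =====
-- def solve(n, k, s):
--     cnt = {}
--     for si in s:
--         cnt[si] = cnt.get(si, 0) + 1
--
--     mok, r = 0, 0
--     for si, v in cnt.items():
--         mok += v // 2
--         r += v % 2
--
--     answer = 2 * (mok // k)
--     r += 2 * (mok % k)
--     answer += bool(r >= k)
--
--     return answer
-- ===== SOURCE B (Python) =====
-- def solve(n, k, s):
--     # Sort, then greedily pair adjacent equal elements in one scan.
--     # In a sorted list equal elements are adjacent, so a run of length v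
--     # yields exactly v // 2 pairs; the unpaired leftovers number len(s) - 2*mok.
--     t = sorted(s)
--     mok = 0
--     i = 0
--     while i + 1 < len(t):
--         if t[i] == t[i + 1]:
--             mok += 1
--             i += 2
--         else:
--             i += 1
--     r = len(s) - 2 * mok
--     answer = 2 * (mok // k)
--     r += 2 * (mok % k)
--     answer += bool(r >= k)
--     return answer
-- ===== Notes on version B (the rewrite author's own statement) =====
-- stated objective: alternative
-- what changed: Replaces the frequency dict plus a second aggregation loop over its items by sorting s and greedily pairing adjacent equal elements in a single scan, with the leftover count recovered as len(s) - 2*mok.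
import Mathlib
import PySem

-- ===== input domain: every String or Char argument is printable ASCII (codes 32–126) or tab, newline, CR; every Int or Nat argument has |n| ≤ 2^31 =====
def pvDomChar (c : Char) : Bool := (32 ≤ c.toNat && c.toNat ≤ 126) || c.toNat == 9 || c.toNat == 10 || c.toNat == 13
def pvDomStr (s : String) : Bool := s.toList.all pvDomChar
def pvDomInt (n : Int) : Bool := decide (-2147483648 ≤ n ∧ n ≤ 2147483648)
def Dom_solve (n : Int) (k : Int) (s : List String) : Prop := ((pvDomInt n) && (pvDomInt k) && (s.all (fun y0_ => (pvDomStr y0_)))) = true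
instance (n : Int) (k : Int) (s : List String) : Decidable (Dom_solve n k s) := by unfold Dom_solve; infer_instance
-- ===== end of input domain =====

-- B replaces A's frequency dict + second aggregation loop by sorting s and greedily
-- pairing adjacent equal elements in one scan (r recovered as len(s) - 2*mok);
-- same return value wherever A returns (k ≠ 0).


-- ===== PORT A =====
def solve (n : Int) (k : Int) (s : List String) : Int :=
  let cnt : PySem.Dict String Int :=
    s.foldl (fun d si => d.insert si (d.getD si 0 + 1)) PySem.Dict.empty
  let p : Int × Int :=
    cnt.items.foldl (fun acc siv =>
      (acc.1 + PySem.Int.floordiv siv.2 2, acc.2 + PySem.Int.mod siv.2 2)) (0, 0)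
  let answer := 2 * PySem.Int.floordiv p.1 k
  let r := p.2 + 2 * PySem.Int.mod p.1 k
  answer + (if r ≥ k then 1 else 0)

-- ===== PORT B =====
-- B's while-loop over indices i / i+1 of the sorted list, transcribed as the
-- obvious structural recursion over the sorted list.
def pairScan : List String → Int
  | a :: b :: rest => if a = b then 1 + pairScan rest else pairScan (b :: rest)
  | _ => 0

def solve_alt (n : Int) (k : Int) (s : List String) : Int :=
  let t := PySem.List.sorted s (fun x => x) false
  let mok := pairScan t
  let r := (s.length : Int) - 2 * mok
  let answer := 2 * PySem.Int.floordiv mok k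
  let r2 := r + 2 * PySem.Int.mod mok k
  answer + (if r2 ≥ k then 1 else 0)

-- ===== PRECONDITION & SPEC =====
-- Pre_ excludes only k = 0, where the Python A raises ZeroDivisionError.
def Pre_solve (n : Int) (k : Int) (s : List String) : Prop := k ≠ 0
instance (n : Int) (k : Int) (s : List String) : Decidable (Pre_solve n k s) := by unfold Pre_solve; infer_instance
def pvWitness_solve : Int × Int × List String := (6, 2, ["a", "b", "a", "b", "a", "c"])

def Spec_solve (n : Int) (k : Int) (s : List String) (out : Int) : Prop := out = solve_alt n k s
instance (n : Int) (k : Int) (s : List String) (out : Int) : Decidable (Spec_solve n k s out) := by unfold Spec_solve; infer_instance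

-- ===== CLAIM (what is proved, stated in full; the proofs are below) =====
def Claim_equal_solve : Prop := ∀ (n : Int) (k : Int) (s : List String), Dom_solve n k s → Pre_solve n k s → Spec_solve n k s (solve n k s)

-- ===== LEMMAS AND PROOFS =====

-- Sum of count/2 over the distinct elements, as a Finset sum (proof-side view).
def pairSum (l : List String) : Int := ∑ c ∈ l.toFinset, ((l.count c / 2 : Nat) : Int)

lemma pairSum_subset (l : List String) (u : Finset String) (hu : l.toFinset ⊆ u) :
    ∑ c ∈ u, ((l.count c / 2 : Nat) : Int) = pairSum l := by
  unfold pairSum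
  refine (Finset.sum_subset hu (fun x _ hx => ?_)).symm
  have : l.count x = 0 := by
    rw [List.count_eq_zero]
    intro hm; exact hx (List.mem_toFinset.mpr hm)
  simp [this]

-- On a sorted list, the greedy adjacent-pairing scan computes Σ count/2.
lemma pairScan_sorted : ∀ (l : List String), l.Pairwise (· ≤ ·) → pairScan l = pairSum l := by
  intro l
  induction l using pairScan.induct with
  | case1 a rest ih =>
    intro hp
    have hp' : rest.Pairwise (· ≤ ·) := (List.pairwise_cons.mp (List.pairwise_cons.mp hp).2).2
    rw [pairScan, if_pos rfl, ih hp']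
    have hsub1 : (a :: a :: rest).toFinset ⊆ insert a rest.toFinset := by
      intro x hx; simp at hx ⊢; tauto
    have hsub2 : rest.toFinset ⊆ insert a rest.toFinset := Finset.subset_insert _ _
    rw [← pairSum_subset (a :: a :: rest) _ hsub1, ← pairSum_subset rest _ hsub2]
    have hterm : ∀ c ∈ insert a rest.toFinset,
        (((a :: a :: rest).count c / 2 : Nat) : Int)
        = ((rest.count c / 2 : Nat) : Int) + (if c = a then 1 else 0) := by
      intro c _
      by_cases hc : c = a
      · subst hc
        rw [List.count_cons_self, List.count_cons_self, if_pos rfl]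
        push_cast; omega
      · have h' : ¬ a = c := fun h => hc h.symm
        simp [h', hc]
    rw [Finset.sum_congr rfl hterm, Finset.sum_add_distrib,
        Finset.sum_ite_eq' _ a, if_pos (Finset.mem_insert_self a _)]
    ring
  | case2 a b rest hab ih =>
    intro hp
    have hp' : (b :: rest).Pairwise (· ≤ ·) := (List.pairwise_cons.mp hp).2
    have hna : a ∉ b :: rest := by
      intro hm
      have hle : a ≤ b := (List.pairwise_cons.mp hp).1 b (List.mem_cons_self)
      rcases List.mem_cons.mp hm with h | h
      · exact hab h
      · have hb : b ≤ a := (List.pairwise_cons.mp hp').1 a h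
        exact hab (le_antisymm hle hb)
    rw [pairScan, if_neg hab, ih hp']
    unfold pairSum
    have hcnt0 : (b :: rest).count a = 0 := List.count_eq_zero.mpr hna
    have hcnt : ∀ c, c ≠ a → (a :: b :: rest).count c = (b :: rest).count c := by
      intro c hc
      have h' : ¬ a = c := fun h => hc h.symm
      simp [List.count_cons, h']
    have htf : (a :: b :: rest).toFinset = insert a (b :: rest).toFinset :=
      List.toFinset_cons
    rw [htf, Finset.sum_insert (by simpa using hna)]
    have : (a :: b :: rest).count a = 1 := by simp [List.count_cons_self, hcnt0]
    rw [this]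
    have : ∑ c ∈ (b :: rest).toFinset, (((a :: b :: rest).count c / 2 : Nat) : Int)
         = ∑ c ∈ (b :: rest).toFinset, (((b :: rest).count c / 2 : Nat) : Int) := by
      refine Finset.sum_congr rfl (fun c hc => ?_)
      have hca : c ≠ a := by
        intro h; subst h; exact hna (List.mem_toFinset.mp hc)
      rw [hcnt c hca]
    rw [this]; norm_num
  | case3 l h1 =>
    intro _
    match l, h1 with
    | [], _ => simp [pairScan, pairSum]
    | [a], _ => simp [pairScan, pairSum]
    | a :: b :: rest, h => exact absurd rfl (h a b rest)

-- pairSum is a multiset invariant.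
lemma pairSum_perm {l l' : List String} (h : l.Perm l') : pairSum l = pairSum l' := by
  unfold pairSum
  rw [List.toFinset_eq_of_perm _ _ h]
  exact Finset.sum_congr rfl (fun c _ => by rw [h.count_eq])

-- A's (mok, r) pair as sums over the distinct elements.
lemma pvA_pair (s : List String) :
    ((PySem.Dict.counter s).items).foldl (fun acc (siv : String × Int) =>
      (acc.1 + PySem.Int.floordiv siv.2 2, acc.2 + PySem.Int.mod siv.2 2)) ((0 : Int), (0 : Int)) =
    (((PySem.Set.ofList s).map (fun c => ((s.count c / 2 : Nat) : Int))).sum,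
     ((PySem.Set.ofList s).map (fun c => ((s.count c % 2 : Nat) : Int))).sum) := by
  rw [PySem.List.foldl_prod_mk (fun a (siv : String × Int) => a + PySem.Int.floordiv siv.2 2)
      (fun a (siv : String × Int) => a + PySem.Int.mod siv.2 2)]
  rw [PySem.Dict.items_counter]
  congr 1
  · rw [PySem.List.foldl_add, List.map_map]
    simp [Function.comp_def]
  · rw [PySem.List.foldl_add, List.map_map]
    simp [Function.comp_def]

-- A list-sum over the nodup distinct-element list is the Finset sum over s.toFinset.
lemma pvSum_ofList (s : List String) (f : String → Int) :
    ((PySem.Set.ofList s).map f).sum = ∑ c ∈ s.toFinset, f c := by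
  have hnd := PySem.Set.nodup_ofList s
  have htf : (PySem.Set.ofList s).toFinset = s.toFinset := by
    ext c; simp [PySem.Set.mem_ofList]
  rw [← List.sum_toFinset f hnd, htf]

-- A's mok equals pairSum s.
lemma pvA_mok (s : List String) :
    ((PySem.Set.ofList s).map (fun c => ((s.count c / 2 : Nat) : Int))).sum = pairSum s := by
  rw [pvSum_ofList]; rfl

-- Counts sum to the length: 2 * mok + r = len(s).
lemma pvSum_counts (s : List String) :
    ((PySem.Set.ofList s).map (fun c => s.count c)).sum = s.length := by
  have hperm : (PySem.Set.ofList s).Perm s.dedup := by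
    rw [List.perm_ext_iff_of_nodup (PySem.Set.nodup_ofList s) s.nodup_dedup]
    intro a; rw [PySem.Set.mem_ofList]; exact (List.mem_dedup).symm
  have := List.Perm.sum_eq (List.Perm.map (fun c => s.count c) hperm)
  rw [this]
  exact List.sum_map_count_dedup_eq_length s

-- ===== VERDICT (by name: the statement is the Claim_ definition above) =====
theorem solve_spec : Claim_equal_solve := by
  intro n k s _ hk
  unfold Spec_solve solve solve_alt
  simp only []
  rw [PySem.Dict.foldl_insert_getD_add_one_eq_counter, pvA_pair]
  set M : Int := ((PySem.Set.ofList s).map (fun c => ((s.count c / 2 : Nat) : Int))).sum with hM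
  set R : Int := ((PySem.Set.ofList s).map (fun c => ((s.count c % 2 : Nat) : Int))).sum with hR
  have hsum : 2 * M + R = (s.length : Int) := by
    have h2 : ∀ c : String, ((s.count c : Nat) : Int) =
        2 * ((s.count c / 2 : Nat) : Int) + ((s.count c % 2 : Nat) : Int) := by
      intro c; push_cast; omega
    have := pvSum_counts s
    have hcast : ((PySem.Set.ofList s).map (fun c => ((s.count c : Nat) : Int))).sum = (s.length : Int) := by
      rw [← this, Nat.cast_list_sum, List.map_map]; rfl
    rw [List.map_congr_left (fun c _ => h2 c),
        PySem.List.sum_map_add_int _ (fun c => 2 * ((s.count c / 2 : Nat) : Int)) (fun c => ((s.count c % 2 : Nat) : Int)),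
        List.sum_map_mul_left] at hcast
    rw [hM, hR]; exact hcast
  have hmok : pairScan (PySem.List.sorted s (fun x => x) false) = M := by
    rw [pairScan_sorted _ (by simpa using PySem.List.sorted_pairwise s (fun x => x)),
        pairSum_perm (PySem.List.sorted_perm s (fun x => x) false), hM, pvA_mok]
  rw [hmok]
  have hr : (s.length : Int) - 2 * M = R := by omega
  rw [hr]
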